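-- pv_equiv track=rewrite | github.com/xieyixu/2024fall-cs | oj03151.py | bfs
-- ===== SOURCE A (Python) =====
-- from collections import deque
--
-- def bfs(A,B,C):
--     initial_state=(0,0)
--     queue=deque([(initial_state,[])])
--     visited=set([initial_state])
--     while queue:
--         (x,y),operations=queue.popleft()
--         if x==C or y==C:
--             return operations
--         possible_operations=[
--             ((A,y),operations+['FILL(1)']),
--             ((x,B),operations+['FILL(2)']),
--             ((0,y),operations+['DROP(1)']),
--             ((x,0),operations+['DROP(2)']),
--             ((max(0,x-B+y),min(B,x+y)),operations+['POUR(1,2)']),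
--             ((min(A,x+y),max(0,y-A+x)),operations+['POUR(2,1)'])
--         ]
--         for new_state,new_operations in possible_operations:
--             if new_state not in visited:
--                 visited.add(new_state)
--                 queue.append((new_state,new_operations))
--     return ['impossible']
-- ===== SOURCE B (Python) =====
-- from collections import deque
--
-- def bfs(A, B, C):
--     # Same breadth-first search, but the queue holds bare states and each state
--     # records its (parent, operation) edge; the operation list is reconstructed
--     # once at the goal instead of being copied on every enqueue.
--     start = (0, 0)
--     parent = {start: None}
--     queue = deque([start])
--     while queue:
--         x, y = queue.popleft()
--         if x == C or y == C:
--             ops = []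
--             cur = (x, y)
--             while parent[cur] is not None:
--                 prev, op = parent[cur]
--                 ops.append(op)
--                 cur = prev
--             ops.reverse()
--             return ops
--         for nstate, op in (
--             ((A, y), 'FILL(1)'),
--             ((x, B), 'FILL(2)'),
--             ((0, y), 'DROP(1)'),
--             ((x, 0), 'DROP(2)'),
--             ((max(0, x - B + y), min(B, x + y)), 'POUR(1,2)'),
--             ((min(A, x + y), max(0, y - A + x)), 'POUR(2,1)'),
--         ):
--             if nstate not in parent:
--                 parent[nstate] = ((x, y), op)
--                 queue.append(nstate)
--     return ['impossible']
-- ===== Notes on version B (the rewrite author's own statement) =====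
-- stated objective: faster
-- what changed: B's queue holds bare states with a parent/edge map recording how each state was first reached, and the operation sequence is reconstructed once when the goal state is dequeued, instead of A's copying of the whole growing operation list on every enqueue.
import Mathlib
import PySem

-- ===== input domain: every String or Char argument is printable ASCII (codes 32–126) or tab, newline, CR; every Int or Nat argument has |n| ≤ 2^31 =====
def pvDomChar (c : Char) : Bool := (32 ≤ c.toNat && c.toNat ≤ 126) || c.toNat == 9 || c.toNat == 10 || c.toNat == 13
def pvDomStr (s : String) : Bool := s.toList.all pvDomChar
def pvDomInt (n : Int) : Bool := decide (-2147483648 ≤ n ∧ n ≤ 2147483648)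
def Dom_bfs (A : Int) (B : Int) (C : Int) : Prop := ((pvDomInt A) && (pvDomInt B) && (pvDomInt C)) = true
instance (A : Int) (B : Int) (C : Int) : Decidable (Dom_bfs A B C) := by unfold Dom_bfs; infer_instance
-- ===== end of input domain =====

-- B replaces A's per-enqueue copying of the whole operation list by a parent/edge
-- map and a single path reconstruction at the goal (objective: faster).

-- ===== PORT A =====
-- one step of A's inner 'for new_state,new_operations in possible_operations' loop
def bfsStepA (acc : List ((Int × Int) × List String) × PySem.Set (Int × Int))
    (p : (Int × Int) × List String) :
    List ((Int × Int) × List String) × PySem.Set (Int × Int) :=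
  if PySem.Set.contains acc.2 p.1 then acc
  else (acc.1 ++ [p], PySem.Set.add acc.2 p.1)

-- A's 'while queue' loop; the fuel only totalises it (returning the same value
-- as the empty-queue exit when exhausted) and is never hit inside Pre_.
def bfsLoopA (A B C : Int) : Nat → List ((Int × Int) × List String) →
    PySem.Set (Int × Int) → List String
  | 0, _, _ => ["impossible"]
  | Nat.succ f, q, visited =>
    match q with
    | [] => ["impossible"]
    | ((x, y), operations) :: rest =>
      if x = C ∨ y = C then operations
      else
        let possible : List ((Int × Int) × List String) :=
          [ ((A, y), operations ++ ["FILL(1)"]),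
            ((x, B), operations ++ ["FILL(2)"]),
            ((0, y), operations ++ ["DROP(1)"]),
            ((x, 0), operations ++ ["DROP(2)"]),
            ((max 0 (x - B + y), min B (x + y)), operations ++ ["POUR(1,2)"]),
            ((min A (x + y), max 0 (y - A + x)), operations ++ ["POUR(2,1)"]) ]
        let r := possible.foldl bfsStepA (rest, visited)
        bfsLoopA A B C f r.1 r.2

def bfs (A : Int) (B : Int) (C : Int) : List String :=
  bfsLoopA A B C (((A + 1) * (B + 1)).toNat + 1)
    [(((0 : Int), (0 : Int)), ([] : List String))]
    (PySem.Set.ofList [(((0 : Int), (0 : Int)))])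

-- ===== PORT B =====
-- B's 'while parent[cur] is not None' reconstruction walk, with an accumulator
-- for the appended ops (reversed at the root) and fuel totalising the walk.
def bfsTrace (d : PySem.Dict (Int × Int) (Option ((Int × Int) × String))) :
    Nat → (Int × Int) → List String → Option (List String)
  | 0, _, _ => none
  | Nat.succ f, cur, ops =>
    match d.get? cur with
    | none => none                     -- Python KeyError: unreachable for queue states
    | some none => some ops.reverse
    | some (some (prev, op)) => bfsTrace d f prev (ops ++ [op])

-- one step of B's inner 'for nstate, op in …' loop
def bfsStepB (x y : Int)
    (acc : List (Int × Int) × PySem.Dict (Int × Int) (Option ((Int × Int) × String)))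
    (p : (Int × Int) × String) :
    List (Int × Int) × PySem.Dict (Int × Int) (Option ((Int × Int) × String)) :=
  if acc.2.contains p.1 then acc
  else (acc.1 ++ [p.1], acc.2.insert p.1 (some ((x, y), p.2)))

def bfsLoopB (A B C : Int) : Nat → List (Int × Int) →
    PySem.Dict (Int × Int) (Option ((Int × Int) × String)) → List String
  | 0, _, _ => ["impossible"]
  | Nat.succ f, q, parent =>
    match q with
    | [] => ["impossible"]
    | (x, y) :: rest =>
      if x = C ∨ y = C then
        (bfsTrace parent (parent.items.length + 1) (x, y) []).getD []
      else
        let neigh : List ((Int × Int) × String) :=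
          [ ((A, y), "FILL(1)"), ((x, B), "FILL(2)"),
            ((0, y), "DROP(1)"), ((x, 0), "DROP(2)"),
            ((max 0 (x - B + y), min B (x + y)), "POUR(1,2)"),
            ((min A (x + y), max 0 (y - A + x)), "POUR(2,1)") ]
        let r := neigh.foldl (bfsStepB x y) (rest, parent)
        bfsLoopB A B C f r.1 r.2

def bfs_alt (A : Int) (B : Int) (C : Int) : List String :=
  bfsLoopB A B C ((A.toNat + 1) * (B.toNat + 1) + 1)
    [((0 : Int), (0 : Int))]
    (PySem.Dict.ofList [(((0 : Int), (0 : Int)), (none : Option ((Int × Int) × String)))])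

-- ===== PRECONDITION & SPEC =====
-- Pre_ excludes negative jug capacities (malformed input outside the task's
-- natural domain): there A's breadth-first search can run forever (e.g.
-- A = -5, B = -4 with unreachable C generates ever-growing states), and where
-- it does return the wandering state values are accidental.
def Pre_bfs (A : Int) (B : Int) (C : Int) : Prop := 0 ≤ A ∧ 0 ≤ B
instance (A : Int) (B : Int) (C : Int) : Decidable (Pre_bfs A B C) := by
  unfold Pre_bfs; infer_instance

def pvWitness_bfs : Int × Int × Int := (3, 5, 4)

def Spec_bfs (A : Int) (B : Int) (C : Int) (out : List String) : Prop := out = bfs_alt A B C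
instance (A : Int) (B : Int) (C : Int) (out : List String) : Decidable (Spec_bfs A B C out) := by unfold Spec_bfs; infer_instance

-- ===== CLAIM (what is proved, stated in full; the proofs are below) =====
def Claim_equal_bfs : Prop := ∀ (A : Int) (B : Int) (C : Int), Dom_bfs A B C → Pre_bfs A B C → Spec_bfs A B C (bfs A B C)

-- ===== LEMMAS AND PROOFS =====

-- the edge recorded for a queue state reconstructs exactly A's operation list,
-- within fuel bounded by the dict size
def bfsTrOK (d : PySem.Dict (Int × Int) (Option ((Int × Int) × String)))
    (s : Int × Int) (ops : List String) : Prop :=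
  bfsTrace d (ops.length + 1) s [] = some ops ∧ ops.length ≤ d.items.length

theorem bfsTrace_fuel_mono (d : PySem.Dict (Int × Int) (Option ((Int × Int) × String))) :
    ∀ f g s acc l, f ≤ g → bfsTrace d f s acc = some l → bfsTrace d g s acc = some l := by
  intro f
  induction f with
  | zero => intro g s acc l _ h; simp [bfsTrace] at h
  | succ f ih =>
    intro g s acc l hfg h
    obtain ⟨g', rfl⟩ : ∃ g', g = g' + 1 := ⟨g - 1, by omega⟩
    rw [bfsTrace] at h ⊢
    cases hg : d.get? s with
    | none => simp only [hg] at h; exact absurd h (by simp)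
    | some v =>
      cases v with
      | none => simp only [hg] at h ⊢; exact h
      | some pr =>
        obtain ⟨p1, p2⟩ := pr
        simp only [hg] at h ⊢
        exact ih g' p1 (acc ++ [p2]) l (by omega) h

theorem bfsTrace_insert_fresh (d : PySem.Dict (Int × Int) (Option ((Int × Int) × String)))
    (k : Int × Int) (v : Option ((Int × Int) × String)) (hk : d.get? k = none) :
    ∀ f s acc l, bfsTrace d f s acc = some l → bfsTrace (d.insert k v) f s acc = some l := by
  intro f
  induction f with
  | zero => intro s acc l h; simp [bfsTrace] at h
  | succ f ih =>
    intro s acc l h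
    rw [bfsTrace] at h ⊢
    cases hg : d.get? s with
    | none => simp only [hg] at h; exact absurd h (by simp)
    | some w =>
      have hsk : s ≠ k := by rintro rfl; rw [hg] at hk; exact absurd hk (by simp)
      rw [PySem.Dict.get?_insert_of_ne d v hsk]
      cases w with
      | none => simp only [hg] at h ⊢; exact h
      | some pr =>
        obtain ⟨p1, p2⟩ := pr
        simp only [hg] at h ⊢
        exact ih p1 (acc ++ [p2]) l h

theorem bfsTrace_acc (d : PySem.Dict (Int × Int) (Option ((Int × Int) × String))) :
    ∀ f s acc, bfsTrace d f s acc = (bfsTrace d f s []).map (· ++ acc.reverse) := by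
  intro f
  induction f with
  | zero => intro s acc; simp [bfsTrace]
  | succ f ih =>
    intro s acc
    rw [bfsTrace, bfsTrace]
    cases hg : d.get? s with
    | none => rfl
    | some w =>
      cases w with
      | none => simp
      | some pr =>
        obtain ⟨p1, p2⟩ := pr
        show bfsTrace d f p1 (acc ++ [p2])
            = (bfsTrace d f p1 ([] ++ [p2])).map (· ++ acc.reverse)
        rw [ih p1 (acc ++ [p2]), ih p1 ([] ++ [p2])]
        cases bfsTrace d f p1 [] <;> simp

-- membership in A's visited set coincides with membership among B's parent keys
def bfsVisInv (vis : PySem.Set (Int × Int))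
    (d : PySem.Dict (Int × Int) (Option ((Int × Int) × String))) : Prop :=
  ∀ s, s ∈ vis ↔ s ∈ d.keys

theorem bfs_contains_eq (vis : PySem.Set (Int × Int))
    (d : PySem.Dict (Int × Int) (Option ((Int × Int) × String)))
    (hv : bfsVisInv vis d) (s : Int × Int) :
    PySem.Set.contains vis s = d.contains s := by
  by_cases h : s ∈ d.keys
  · have h1 : PySem.Set.contains vis s = true := (PySem.Set.contains_iff vis s).2 ((hv s).2 h)
    have h2 : d.contains s = true := (PySem.Dict.contains_iff_mem_keys d s).2 h
    rw [h1, h2]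
  · have h1 : PySem.Set.contains vis s = false := by
      rw [Bool.eq_false_iff]
      exact fun hm => h ((hv s).1 ((PySem.Set.contains_iff vis s).1 hm))
    have h2 : d.contains s = false := by
      rw [Bool.eq_false_iff]
      exact fun hc => h ((PySem.Dict.contains_iff_mem_keys d s).1 hc)
    rw [h1, h2]

-- the two inner loops preserve the whole simulation invariant
theorem bfs_fold_inv (x y : Int) (ops : List String) :
    ∀ (l : List ((Int × Int) × String)) qA qB vis d,
      qA.map Prod.fst = qB → bfsVisInv vis d →
      (∀ e ∈ qA, bfsTrOK d e.1 e.2) → bfsTrOK d (x, y) ops →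
      ((l.map (fun p => (p.1, ops ++ [p.2]))).foldl bfsStepA (qA, vis)).1.map Prod.fst
          = (l.foldl (bfsStepB x y) (qB, d)).1 ∧
        bfsVisInv ((l.map (fun p => (p.1, ops ++ [p.2]))).foldl bfsStepA (qA, vis)).2
          (l.foldl (bfsStepB x y) (qB, d)).2 ∧
        (∀ e ∈ ((l.map (fun p => (p.1, ops ++ [p.2]))).foldl bfsStepA (qA, vis)).1,
          bfsTrOK (l.foldl (bfsStepB x y) (qB, d)).2 e.1 e.2) ∧
        bfsTrOK (l.foldl (bfsStepB x y) (qB, d)).2 (x, y) ops := by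
  intro l
  induction l with
  | nil => intro qA qB vis d hq hv htr hxy; exact ⟨hq, hv, htr, hxy⟩
  | cons p l ih =>
    intro qA qB vis d hq hv htr hxy
    simp only [List.map_cons, List.foldl_cons]
    by_cases hmem : p.1 ∈ d.keys
    · -- already visited on both sides: both steps are the identity
      have hA : bfsStepA (qA, vis) (p.1, ops ++ [p.2]) = (qA, vis) := by
        unfold bfsStepA
        rw [bfs_contains_eq vis d hv]
        simp [(PySem.Dict.contains_iff_mem_keys d p.1).2 hmem]
      have hB : bfsStepB x y (qB, d) p = (qB, d) := by
        unfold bfsStepB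
        simp [(PySem.Dict.contains_iff_mem_keys d p.1).2 hmem]
      rw [hA, hB]
      exact ih qA qB vis d hq hv htr hxy
    · -- fresh state: both sides enqueue it and record it
      have hcontF : d.contains p.1 = false := by
        simp only [Bool.eq_false_iff, Ne]
        exact fun hc => hmem ((PySem.Dict.contains_iff_mem_keys d p.1).1 hc)
      have hgetN : d.get? p.1 = none := by
        have := PySem.Dict.contains_eq_isSome_get? (d := d) (k := p.1)
        rw [hcontF] at this
        cases hg : d.get? p.1 with
        | none => rfl
        | some w => rw [hg] at this; simp at this
      have hA : bfsStepA (qA, vis) (p.1, ops ++ [p.2])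
          = (qA ++ [(p.1, ops ++ [p.2])], PySem.Set.add vis p.1) := by
        unfold bfsStepA
        rw [bfs_contains_eq vis d hv, hcontF]
        simp
      have hB : bfsStepB x y (qB, d) p
          = (qB ++ [p.1], d.insert p.1 (some ((x, y), p.2))) := by
        unfold bfsStepB
        rw [hcontF]
        simp
      rw [hA, hB]
      set d' := d.insert p.1 (some ((x, y), p.2)) with hd'
      have hlen' : d'.items.length = d.items.length + 1 := by
        rw [hd', PySem.Dict.items_insert_of_not_contains d _ hcontF]
        simp
      have htr' : ∀ e ∈ qA, bfsTrOK d' e.1 e.2 := by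
        intro e he
        obtain ⟨h1, h2⟩ := htr e he
        exact ⟨bfsTrace_insert_fresh d p.1 _ hgetN _ _ _ _ h1, by omega⟩
      have hxy' : bfsTrOK d' (x, y) ops :=
        ⟨bfsTrace_insert_fresh d p.1 _ hgetN _ _ _ _ hxy.1, by have := hxy.2; omega⟩
      have hnew : bfsTrOK d' p.1 (ops ++ [p.2]) := by
        constructor
        · have hget : d'.get? p.1 = some (some ((x, y), p.2)) :=
            PySem.Dict.get?_insert_self _ _ _
          show bfsTrace d' ((ops ++ [p.2]).length + 1) p.1 [] = some (ops ++ [p.2])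
          have hlen : (ops ++ [p.2]).length + 1 = (ops.length + 1) + 1 := by simp
          rw [hlen, bfsTrace]
          simp only [hget]
          rw [bfsTrace_acc d' (ops.length + 1) (x, y) ([] ++ [p.2]), hxy'.1]
          simp
        · have h2 := hxy.2
          simp only [List.length_append, List.length_cons, List.length_nil, hlen']
          omega
      refine ih (qA ++ [(p.1, ops ++ [p.2])]) (qB ++ [p.1]) (PySem.Set.add vis p.1) d' ?_ ?_ ?_ hxy'
      · simp [hq]
      · intro s
        rw [PySem.Set.mem_add, hd', PySem.Dict.mem_keys_insert]
        constructor
        · rintro (hs | rfl)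
          · exact Or.inr ((hv s).1 hs)
          · exact Or.inl rfl
        · rintro (rfl | hs)
          · exact Or.inr rfl
          · exact Or.inl ((hv s).2 hs)
      · intro e he
        rcases List.mem_append.1 he with he | he
        · exact htr' e he
        · simp at he
          subst he
          exact hnew

theorem bfs_loop_eq (A B C : Int) :
    ∀ f qA qB vis d, qA.map Prod.fst = qB → bfsVisInv vis d →
      (∀ e ∈ qA, bfsTrOK d e.1 e.2) →
      bfsLoopA A B C f qA vis = bfsLoopB A B C f qB d := by
  intro f
  induction f with
  | zero => intro qA qB vis d _ _ _; rfl
  | succ f ih =>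
    intro qA qB vis d hq hv htr
    cases qA with
    | nil =>
      have : qB = [] := by simpa using hq.symm
      subst this; rfl
    | cons e rest =>
      obtain ⟨⟨x, y⟩, ops⟩ := e
      obtain ⟨restB, rfl⟩ : ∃ restB, qB = (x, y) :: restB :=
        ⟨rest.map Prod.fst, by simpa using hq.symm⟩
      have hrest : rest.map Prod.fst = restB := by simpa using hq
      have hhead : bfsTrOK d (x, y) ops := htr _ (List.mem_cons_self ..)
      rw [bfsLoopA, bfsLoopB]
      by_cases hgoal : x = C ∨ y = C
      · simp only [if_pos hgoal]
        have := bfsTrace_fuel_mono d (ops.length + 1) (d.items.length + 1) (x, y) [] ops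
          (by have := hhead.2; omega) hhead.1
        rw [this]
        rfl
      · simp only [if_neg hgoal]
        have hposs :
            [ ((A, y), ops ++ ["FILL(1)"]), ((x, B), ops ++ ["FILL(2)"]),
              ((0, y), ops ++ ["DROP(1)"]), ((x, 0), ops ++ ["DROP(2)"]),
              ((max 0 (x - B + y), min B (x + y)), ops ++ ["POUR(1,2)"]),
              ((min A (x + y), max 0 (y - A + x)), ops ++ ["POUR(2,1)"]) ]
            = ([ ((A, y), "FILL(1)"), ((x, B), "FILL(2)"),
                ((0, y), "DROP(1)"), ((x, 0), "DROP(2)"),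
                ((max 0 (x - B + y), min B (x + y)), "POUR(1,2)"),
                ((min A (x + y), max 0 (y - A + x)), "POUR(2,1)") ].map
                  (fun p => (p.1, ops ++ [p.2]))) := by simp
        rw [hposs]
        obtain ⟨h1, h2, h3, _⟩ := bfs_fold_inv x y ops
          [ ((A, y), "FILL(1)"), ((x, B), "FILL(2)"),
            ((0, y), "DROP(1)"), ((x, 0), "DROP(2)"),
            ((max 0 (x - B + y), min B (x + y)), "POUR(1,2)"),
            ((min A (x + y), max 0 (y - A + x)), "POUR(2,1)") ]
          rest restB vis d hrest hv (fun e he => htr e (List.mem_cons_of_mem _ he)) hhead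
        exact ih _ _ _ _ h1 h2 h3

-- ===== VERDICT (by name: the statement is the Claim_ definition above) =====
theorem bfs_spec : Claim_equal_bfs := by
  intro A B C _ hpre
  obtain ⟨hA, hB⟩ := hpre
  unfold Spec_bfs bfs bfs_alt
  have hfuel : ((A + 1) * (B + 1)).toNat + 1 = (A.toNat + 1) * (B.toNat + 1) + 1 := by
    rw [show A + 1 = ((A.toNat + 1 : Nat) : Int) by omega,
        show B + 1 = ((B.toNat + 1 : Nat) : Int) by omega,
        ← Nat.cast_mul, Int.toNat_natCast]
  rw [hfuel]
  apply bfs_loop_eq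
  · rfl
  · intro s
    have hkeys : (PySem.Dict.ofList
        [(((0 : Int), (0 : Int)), (none : Option ((Int × Int) × String)))]).keys
        = [((0 : Int), (0 : Int))] := rfl
    rw [hkeys]
    constructor
    · intro hs
      simp [PySem.Set.ofList] at hs
      simp [hs]
    · intro hs
      simp at hs
      simp [PySem.Set.ofList, hs]
  · intro e he
    simp at he
    subst he
    exact ⟨rfl, by decide⟩
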